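-- pv_equiv track=rewrite | github.com/ltvlx/Pizza-cutting-problem | tests/test_directions.py | generate_walk
-- ===== SOURCE A (Python) =====
-- def generate_walk(n_row, n_col, key='lrud'):
--     if key == 'lrud':
--         for y in range(n_row):
--             for x in range(n_col):
--                 yield (x, y)
--     elif key == 'udlr':
--         for x in range(n_col):
--             for y in range(n_row):
--                 yield (x, y)
--     elif key == 'rldu':
--         for y in range(n_row-1, -1, -1):
--             for x in range(n_col-1, -1, -1):
--                 yield (x, y)
--     elif key == 'durl':
--         for x in range(n_col-1, -1, -1):
--             for y in range(n_row-1, -1, -1):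
--                 yield (x, y)
-- ===== SOURCE B (Python) =====
-- def generate_walk(n_row, n_col, key='lrud'):
--     R, C = max(n_row, 0), max(n_col, 0)
--     forms = {
--         'lrud': lambda k: (k % C, k // C),
--         'udlr': lambda k: (k // R, k % R),
--         'rldu': lambda k: (C - 1 - k % C, R - 1 - k // C),
--         'durl': lambda k: (C - 1 - k // R, R - 1 - k % R),
--     }
--     f = forms.get(key)
--     if f is not None:
--         for k in range(R * C):
--             yield f(k)
-- ===== Notes on version B (the rewrite author's own statement) =====
-- stated objective: alternative
-- what changed: Replaces A's four hand-written pairs of nested loops (one if/elif branch per traversal key) with a single flat loop over one index range(R*C) plus a dict mapping each key to a closed-form index->coordinate formula (divmod arithmetic); unknown keys miss the table and yield nothing, as in A.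
import Mathlib
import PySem

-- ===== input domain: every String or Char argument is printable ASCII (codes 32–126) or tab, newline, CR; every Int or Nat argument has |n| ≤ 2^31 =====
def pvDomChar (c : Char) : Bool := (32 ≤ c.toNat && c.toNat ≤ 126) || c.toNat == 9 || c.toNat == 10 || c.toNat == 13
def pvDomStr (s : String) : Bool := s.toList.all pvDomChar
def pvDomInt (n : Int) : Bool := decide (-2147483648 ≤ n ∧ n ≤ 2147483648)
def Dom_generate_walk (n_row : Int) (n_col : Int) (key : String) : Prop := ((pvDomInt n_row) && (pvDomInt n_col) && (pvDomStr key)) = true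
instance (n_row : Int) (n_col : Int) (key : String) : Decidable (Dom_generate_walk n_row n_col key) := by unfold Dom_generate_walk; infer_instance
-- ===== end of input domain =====

-- B replaces A's four hand-written pairs of nested loops by one flat loop over a single
-- index range(R*C) with a table of per-key index→coordinate formulas (objective: alternative).
-- A and B are Python generators; both are ported as the list of yielded pairs.

-- ===== PORT A =====
-- literal transliteration of A: an if/elif chain of nested for-loops collecting the yields
def generate_walk (n_row : Int) (n_col : Int) (key : String) : List (Int × Int) :=
  if key = "lrud" then
    (PySem.List.pyRange 0 n_row 1).flatMap (fun y =>
      (PySem.List.pyRange 0 n_col 1).map (fun x => (x, y)))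
  else if key = "udlr" then
    (PySem.List.pyRange 0 n_col 1).flatMap (fun x =>
      (PySem.List.pyRange 0 n_row 1).map (fun y => (x, y)))
  else if key = "rldu" then
    (PySem.List.pyRange (n_row - 1) (-1) (-1)).flatMap (fun y =>
      (PySem.List.pyRange (n_col - 1) (-1) (-1)).map (fun x => (x, y)))
  else if key = "durl" then
    (PySem.List.pyRange (n_col - 1) (-1) (-1)).flatMap (fun x =>
      (PySem.List.pyRange (n_row - 1) (-1) (-1)).map (fun y => (x, y)))
  else []

-- ===== PORT B =====
-- literal transliteration of B: a dict of per-key formulas, one flat loop over range(R*C)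
def generate_walk_alt (n_row : Int) (n_col : Int) (key : String) : List (Int × Int) :=
  let R : Int := max n_row 0
  let C : Int := max n_col 0
  let forms : PySem.Dict String (Int → Int × Int) := PySem.Dict.ofList
    [("lrud", fun k => (PySem.Int.mod k C, PySem.Int.floordiv k C)),
     ("udlr", fun k => (PySem.Int.floordiv k R, PySem.Int.mod k R)),
     ("rldu", fun k => (C - 1 - PySem.Int.mod k C, R - 1 - PySem.Int.floordiv k C)),
     ("durl", fun k => (C - 1 - PySem.Int.floordiv k R, R - 1 - PySem.Int.mod k R))]
  match forms.get? key with
  | some f => (PySem.List.pyRange 0 (R * C) 1).map f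
  | none => []

-- ===== PRECONDITION & SPEC =====
def Spec_generate_walk (n_row : Int) (n_col : Int) (key : String) (out : List (Int × Int)) : Prop := out = generate_walk_alt n_row n_col key
instance (n_row : Int) (n_col : Int) (key : String) (out : List (Int × Int)) : Decidable (Spec_generate_walk n_row n_col key out) := by unfold Spec_generate_walk; infer_instance

-- ===== CLAIM (what is proved, stated in full; the proofs are below) =====
def Claim_equal_generate_walk : Prop := ∀ (n_row : Int) (n_col : Int) (key : String), Dom_generate_walk n_row n_col key → Spec_generate_walk n_row n_col key (generate_walk n_row n_col key)

-- ===== LEMMAS AND PROOFS =====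

-- row-major flattening of a rectangular double loop, Nat level
theorem pv_flat_nat {α : Type} (r c : Nat) (f : Nat → Nat → α) :
    (List.range r).flatMap (fun a => (List.range c).map (f a)) =
      (List.range (r * c)).map (fun k => f (k / c) (k % c)) := by
  induction r with
  | zero => simp
  | succ r ih =>
    rcases Nat.eq_zero_or_pos c with hc | hc
    · subst hc; simp
    · rw [List.range_succ, List.flatMap_append, ih, Nat.succ_mul, List.range_add,
        List.map_append, List.map_map]
      congr 1
      simp only [List.flatMap_cons, List.flatMap_nil, List.append_nil]
      refine List.map_congr_left (fun j hj => ?_)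
      rw [List.mem_range] at hj
      have h1 : (r * c + j) / c = r := by
        rw [Nat.add_comm, Nat.add_mul_div_right _ _ hc, Nat.div_eq_of_lt hj]; omega
      have h2 : (r * c + j) % c = j := by
        rw [Nat.add_comm, Nat.add_mul_mod_self_right, Nat.mod_eq_of_lt hj]
      simp only [Function.comp_def, h1, h2]

-- an ascending double loop over range(m) × range(n) equals the flat indexed loop
theorem pv_asc {α : Type} (m n : Int) (g : Int → Int → α) :
    (PySem.List.pyRange 0 m 1).flatMap (fun a =>
        (PySem.List.pyRange 0 n 1).map (fun b => g a b)) =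
      (PySem.List.pyRange 0 (max m 0 * max n 0) 1).map (fun k =>
        g (PySem.Int.floordiv k (max n 0)) (PySem.Int.mod k (max n 0))) := by
  have hm : max m 0 = ((m.toNat : Nat) : Int) := by omega
  have hn : max n 0 = ((n.toNat : Nat) : Int) := by omega
  rw [hm, hn, PySem.List.pyRange_one 0 m, PySem.List.pyRange_one 0 n, PySem.List.pyRange_one]
  have hmul : ((m.toNat : Int) * (n.toNat : Int) - 0).toNat = m.toNat * n.toNat := by
    rw [Int.sub_zero, ← Int.natCast_mul, Int.toNat_natCast]
  rw [hmul, List.flatMap_map]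
  simp only [Int.sub_zero, zero_add, List.map_map, Function.comp_def]
  rw [pv_flat_nat m.toNat n.toNat (fun a b => g (a : Int) (b : Int))]
  refine List.map_congr_left (fun k _ => ?_)
  simp only [PySem.Int.floordiv_natCast, PySem.Int.mod_natCast]

-- a descending double loop over range(m-1,-1,-1) × range(n-1,-1,-1) equals the flat indexed loop
theorem pv_desc {α : Type} (m n : Int) (g : Int → Int → α) :
    (PySem.List.pyRange (m - 1) (-1) (-1)).flatMap (fun a =>
        (PySem.List.pyRange (n - 1) (-1) (-1)).map (fun b => g a b)) =
      (PySem.List.pyRange 0 (max m 0 * max n 0) 1).map (fun k =>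
        g (max m 0 - 1 - PySem.Int.floordiv k (max n 0))
          (max n 0 - 1 - PySem.Int.mod k (max n 0))) := by
  have hm : max m 0 = ((m.toNat : Nat) : Int) := by omega
  have hn : max n 0 = ((n.toNat : Nat) : Int) := by omega
  have hmt : (m - 1 - (-1)).toNat = m.toNat := by omega
  have hnt : (n - 1 - (-1)).toNat = n.toNat := by omega
  rw [hm, hn, PySem.List.pyRange_neg_one (m - 1) (-1), PySem.List.pyRange_neg_one (n - 1) (-1),
    PySem.List.pyRange_one, hmt, hnt]
  have hmul : ((m.toNat : Int) * (n.toNat : Int) - 0).toNat = m.toNat * n.toNat := by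
    rw [Int.sub_zero, ← Int.natCast_mul, Int.toNat_natCast]
  rw [hmul, List.flatMap_map]
  simp only [zero_add, List.map_map, Function.comp_def]
  rw [pv_flat_nat m.toNat n.toNat (fun a b => g (m - 1 - (a : Int)) (n - 1 - (b : Int)))]
  refine List.map_congr_left (fun k hk => ?_)
  rw [List.mem_range] at hk
  have hn0 : 0 < n.toNat := by
    rcases Nat.eq_zero_or_pos n.toNat with h | h
    · rw [h, Nat.mul_zero] at hk; omega
    · exact h
  have hm0 : 0 < m.toNat := by
    rcases Nat.eq_zero_or_pos m.toNat with h | h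
    · rw [h, Nat.zero_mul] at hk; omega
    · exact h
  simp only [PySem.Int.floordiv_natCast, PySem.Int.mod_natCast]
  have e1 : m - 1 - ((k / n.toNat : Nat) : Int) = ((m.toNat : Nat) : Int) - 1 - ((k / n.toNat : Nat) : Int) := by omega
  have e2 : n - 1 - ((k % n.toNat : Nat) : Int) = ((n.toNat : Nat) : Int) - 1 - ((k % n.toNat : Nat) : Int) := by omega
  rw [e1, e2]

-- each of the four keys selects its branch of A / its table entry of B
theorem pv_a_lrud (n_row n_col : Int) :
    generate_walk n_row n_col "lrud" =
      (PySem.List.pyRange 0 n_row 1).flatMap (fun y =>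
        (PySem.List.pyRange 0 n_col 1).map (fun x => (x, y))) := rfl

theorem pv_a_udlr (n_row n_col : Int) :
    generate_walk n_row n_col "udlr" =
      (PySem.List.pyRange 0 n_col 1).flatMap (fun x =>
        (PySem.List.pyRange 0 n_row 1).map (fun y => (x, y))) := rfl

theorem pv_a_rldu (n_row n_col : Int) :
    generate_walk n_row n_col "rldu" =
      (PySem.List.pyRange (n_row - 1) (-1) (-1)).flatMap (fun y =>
        (PySem.List.pyRange (n_col - 1) (-1) (-1)).map (fun x => (x, y))) := rfl

theorem pv_a_durl (n_row n_col : Int) :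
    generate_walk n_row n_col "durl" =
      (PySem.List.pyRange (n_col - 1) (-1) (-1)).flatMap (fun x =>
        (PySem.List.pyRange (n_row - 1) (-1) (-1)).map (fun y => (x, y))) := rfl

theorem pv_alt_lrud (n_row n_col : Int) :
    generate_walk_alt n_row n_col "lrud" =
      (PySem.List.pyRange 0 (max n_row 0 * max n_col 0) 1).map (fun k =>
        (PySem.Int.mod k (max n_col 0), PySem.Int.floordiv k (max n_col 0))) := rfl

theorem pv_alt_udlr (n_row n_col : Int) :
    generate_walk_alt n_row n_col "udlr" =
      (PySem.List.pyRange 0 (max n_row 0 * max n_col 0) 1).map (fun k =>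
        (PySem.Int.floordiv k (max n_row 0), PySem.Int.mod k (max n_row 0))) := rfl

theorem pv_alt_rldu (n_row n_col : Int) :
    generate_walk_alt n_row n_col "rldu" =
      (PySem.List.pyRange 0 (max n_row 0 * max n_col 0) 1).map (fun k =>
        (max n_col 0 - 1 - PySem.Int.mod k (max n_col 0),
         max n_row 0 - 1 - PySem.Int.floordiv k (max n_col 0))) := rfl

theorem pv_alt_durl (n_row n_col : Int) :
    generate_walk_alt n_row n_col "durl" =
      (PySem.List.pyRange 0 (max n_row 0 * max n_col 0) 1).map (fun k =>
        (max n_col 0 - 1 - PySem.Int.floordiv k (max n_row 0),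
         max n_row 0 - 1 - PySem.Int.mod k (max n_row 0))) := rfl

-- any other key misses the table of B (and every branch of A)
theorem pv_alt_other (n_row n_col : Int) (key : String) (h1 : key ≠ "lrud")
    (h2 : key ≠ "udlr") (h3 : key ≠ "rldu") (h4 : key ≠ "durl") :
    generate_walk_alt n_row n_col key = [] := by
  have hd : generate_walk_alt n_row n_col key =
      match (PySem.Dict.mk
        [("lrud", fun k => (PySem.Int.mod k (max n_col 0), PySem.Int.floordiv k (max n_col 0))),
         ("udlr", fun k => (PySem.Int.floordiv k (max n_row 0), PySem.Int.mod k (max n_row 0))),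
         ("rldu", fun k => (max n_col 0 - 1 - PySem.Int.mod k (max n_col 0),
            max n_row 0 - 1 - PySem.Int.floordiv k (max n_col 0))),
         ("durl", fun k => (max n_col 0 - 1 - PySem.Int.floordiv k (max n_row 0),
            max n_row 0 - 1 - PySem.Int.mod k (max n_row 0)))]).get? key with
      | some f => (PySem.List.pyRange 0 (max n_row 0 * max n_col 0) 1).map f
      | none => [] := rfl
  rw [hd]
  simp [PySem.Dict.get?, Ne.symm h1, Ne.symm h2, Ne.symm h3, Ne.symm h4]

-- ===== VERDICT (by name: the statement is the Claim_ definition above) =====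
theorem generate_walk_spec : Claim_equal_generate_walk := by
  intro n_row n_col key _
  unfold Spec_generate_walk
  by_cases h1 : key = "lrud"
  · subst h1
    rw [pv_a_lrud, pv_alt_lrud]
    exact pv_asc n_row n_col (fun y x => (x, y))
  · by_cases h2 : key = "udlr"
    · subst h2
      rw [pv_a_udlr, pv_alt_udlr, pv_asc n_col n_row (fun x y => (x, y)), Int.mul_comm]
    · by_cases h3 : key = "rldu"
      · subst h3
        rw [pv_a_rldu, pv_alt_rldu]
        exact pv_desc n_row n_col (fun y x => (x, y))
      · by_cases h4 : key = "durl"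
        · subst h4
          rw [pv_a_durl, pv_alt_durl, pv_desc n_col n_row (fun x y => (x, y)), Int.mul_comm]
        · rw [pv_alt_other n_row n_col key h1 h2 h3 h4, generate_walk]
          simp [h1, h2, h3, h4]
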